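-- pv_equiv track=rewrite | github.com/UD-X-Lab/SecretScout | src/util.py | compare_to_ground_truth
-- ===== SOURCE A (Python) =====
-- import copy
--
-- def compare_to_ground_truth(
--     ground_truth, scanned_secrets
-- ) -> tuple[int, int, int]:
--
--     tp_cnt = 0
--     fn_cnt = 0
--     fp_cnt = 0
--
--     len_true_secrets = len(ground_truth)
--     len_scanned_secrets = len(scanned_secrets)
--     if len_scanned_secrets == 0 and len_true_secrets == 0:
--         return tp_cnt, fp_cnt, fn_cnt
--     if len_scanned_secrets > 0 and len_true_secrets == 0:
--         return tp_cnt, len_scanned_secrets, fn_cnt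
--     if len_scanned_secrets == 0 and len_true_secrets > 0:
--         return tp_cnt, fp_cnt, len_true_secrets
--
--     copy_ground_truth = copy.deepcopy(ground_truth)
--     for i in range(len_scanned_secrets):
--         # if x == 2:
--         x = scanned_secrets[i]
--         if x in copy_ground_truth:
--             tp_cnt += 1
--             copy_ground_truth.remove(x)
--         else:
--             fp_cnt += 1
--
--     fn_cnt = len(copy_ground_truth)
--
--     return tp_cnt, fp_cnt, fn_cnt
-- ===== SOURCE B (Python) =====
-- def compare_to_ground_truth(ground_truth, scanned_secrets):
--     gt_counts = {}
--     for x in ground_truth: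
--         gt_counts[x] = gt_counts.get(x, 0) + 1
--     sc_counts = {}
--     for x in scanned_secrets:
--         sc_counts[x] = sc_counts.get(x, 0) + 1
--     tp = sum(min(c, sc_counts.get(x, 0)) for x, c in gt_counts.items())
--     return tp, len(scanned_secrets) - tp, len(ground_truth) - tp
-- ===== Notes on version B (the rewrite author's own statement) =====
-- stated objective: faster
-- what changed: Replaces the per-item probe-and-remove loop over a mutated copy of ground_truth with two frequency tables built in one pass each; tp is the multiset-intersection size computed arithmetically and fp/fn are derived by subtraction, with no membership scans or list mutation.
import Mathlib
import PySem

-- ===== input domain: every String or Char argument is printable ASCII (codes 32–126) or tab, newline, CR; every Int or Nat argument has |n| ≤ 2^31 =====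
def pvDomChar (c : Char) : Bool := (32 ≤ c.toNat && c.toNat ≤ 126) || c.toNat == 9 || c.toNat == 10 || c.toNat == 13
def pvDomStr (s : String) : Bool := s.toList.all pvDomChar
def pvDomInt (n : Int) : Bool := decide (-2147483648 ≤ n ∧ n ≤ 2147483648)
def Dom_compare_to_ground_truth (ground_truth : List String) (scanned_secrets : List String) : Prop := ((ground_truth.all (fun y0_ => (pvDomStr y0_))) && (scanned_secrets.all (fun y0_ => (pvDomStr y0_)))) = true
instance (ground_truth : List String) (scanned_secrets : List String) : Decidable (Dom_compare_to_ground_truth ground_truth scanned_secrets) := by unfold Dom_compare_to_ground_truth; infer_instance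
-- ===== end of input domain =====

-- B replaces A's quadratic probe-and-remove loop by two one-pass frequency tables and
-- pure arithmetic (tp = multiset-intersection size, fp/fn by subtraction): faster, no mutation.

-- ===== PORT A =====
-- the for-loop over scanned_secrets: state (tp_cnt, fp_cnt, copy_ground_truth);
-- Python's `copy_ground_truth.remove(x)` under the `x in copy_ground_truth` guard removes
-- the first occurrence, which is exactly List.erase.
def ctgLoopA : List String → Int → Int → List String → Int × Int × List String
  | [], tp, fp, rest => (tp, fp, rest)
  | x :: s, tp, fp, rest =>
    if rest.contains x then ctgLoopA s (tp + 1) fp (rest.erase x)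
    else ctgLoopA s tp (fp + 1) rest

def compare_to_ground_truth (ground_truth : List String) (scanned_secrets : List String) : List Int :=
  let len_true_secrets : Int := ground_truth.length
  let len_scanned_secrets : Int := scanned_secrets.length
  if len_scanned_secrets = 0 ∧ len_true_secrets = 0 then [0, 0, 0]
  else if len_scanned_secrets > 0 ∧ len_true_secrets = 0 then [0, len_scanned_secrets, 0]
  else if len_scanned_secrets = 0 ∧ len_true_secrets > 0 then [0, 0, len_true_secrets]
  else
    match ctgLoopA scanned_secrets 0 0 ground_truth with
    | (tp, fp, rest) => [tp, fp, (rest.length : Int)]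

-- ===== PORT B =====
def compare_to_ground_truth_alt (ground_truth : List String) (scanned_secrets : List String) : List Int :=
  let gt_counts : PySem.Dict String Int :=
    ground_truth.foldl (fun d x => d.insert x (d.getD x 0 + 1)) PySem.Dict.empty
  let sc_counts : PySem.Dict String Int :=
    scanned_secrets.foldl (fun d x => d.insert x (d.getD x 0 + 1)) PySem.Dict.empty
  let tp : Int := (gt_counts.items.map (fun p => min p.2 (sc_counts.getD p.1 0))).sum
  [tp, (scanned_secrets.length : Int) - tp, (ground_truth.length : Int) - tp]

-- ===== PRECONDITION & SPEC =====
def Spec_compare_to_ground_truth (ground_truth : List String) (scanned_secrets : List String) (out : List Int) : Prop := out = compare_to_ground_truth_alt ground_truth scanned_secrets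
instance (ground_truth : List String) (scanned_secrets : List String) (out : List Int) : Decidable (Spec_compare_to_ground_truth ground_truth scanned_secrets out) := by unfold Spec_compare_to_ground_truth; infer_instance

-- ===== CLAIM (what is proved, stated in full; the proofs are below) =====
def Claim_equal_compare_to_ground_truth : Prop := ∀ (ground_truth : List String) (scanned_secrets : List String), Dom_compare_to_ground_truth ground_truth scanned_secrets → Spec_compare_to_ground_truth ground_truth scanned_secrets (compare_to_ground_truth ground_truth scanned_secrets)

-- ===== LEMMAS AND PROOFS =====

-- multiset intersection size: the number of true positives
def ctgI (s rest : List String) : Nat := Multiset.card ((s : Multiset String) ∩ (rest : Multiset String))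

theorem ctgI_cons_pos {x : String} {s rest : List String} (h : x ∈ rest) :
    ctgI (x :: s) rest = ctgI s (rest.erase x) + 1 := by
  unfold ctgI
  rw [show ((x :: s : List String) : Multiset String) = x ::ₘ (s : Multiset String) from rfl,
    Multiset.cons_inter_of_pos _ (by simpa using h)]
  simp [Multiset.coe_erase]

theorem ctgI_cons_neg {x : String} {s rest : List String} (h : x ∉ rest) :
    ctgI (x :: s) rest = ctgI s rest := by
  unfold ctgI
  rw [show ((x :: s : List String) : Multiset String) = x ::ₘ (s : Multiset String) from rfl,
    Multiset.cons_inter_of_neg _ (by simpa using h)]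

theorem ctgLoopA_spec : ∀ (s rest : List String) (tp fp : Int),
    (ctgLoopA s tp fp rest).1 = tp + (ctgI s rest : Int) ∧
    (ctgLoopA s tp fp rest).2.1 = fp + ((s.length : Int) - (ctgI s rest : Int)) ∧
    ((ctgLoopA s tp fp rest).2.2.length : Int) = (rest.length : Int) - (ctgI s rest : Int)
  | [], rest, tp, fp => by
    simp [ctgLoopA, ctgI]
  | x :: s, rest, tp, fp => by
    by_cases h : x ∈ rest
    · have hstep : ctgLoopA (x :: s) tp fp rest = ctgLoopA s (tp + 1) fp (rest.erase x) := by
        simp [ctgLoopA, h]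
      obtain ⟨ih1, ih2, ih3⟩ := ctgLoopA_spec s (rest.erase x) (tp + 1) fp
      have hlen : (rest.erase x).length + 1 = rest.length := by
        have hpos := List.length_pos_of_mem h
        rw [List.length_erase_of_mem h]; omega
      rw [hstep, ctgI_cons_pos h]
      simp only [List.length_cons]
      push_cast
      refine ⟨by rw [ih1]; ring, by rw [ih2]; ring, by rw [ih3]; omega⟩
    · have hstep : ctgLoopA (x :: s) tp fp rest = ctgLoopA s tp (fp + 1) rest := by
        simp [ctgLoopA, h]
      obtain ⟨ih1, ih2, ih3⟩ := ctgLoopA_spec s rest tp (fp + 1)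
      rw [hstep, ctgI_cons_neg h]
      simp only [List.length_cons]
      push_cast
      refine ⟨by rw [ih1], by rw [ih2]; ring, by rw [ih3]⟩

-- B's tp (sum over distinct ground-truth values of the smaller count) is the multiset-intersection size
theorem ctg_sum_min_eq_nat (gt sc : List String) :
    ((PySem.Set.ofList gt).map (fun k => min (gt.count k) (sc.count k))).sum = ctgI sc gt := by
  have hperm : (PySem.Set.ofList gt).Perm gt.dedup := by
    rw [List.perm_ext_iff_of_nodup (PySem.Set.nodup_ofList gt) gt.nodup_dedup]
    intro a
    simp [PySem.Set.mem_ofList]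
  rw [List.Perm.sum_eq (hperm.map _)]
  rw [← List.sum_toFinset _ gt.nodup_dedup]
  rw [show gt.dedup.toFinset = gt.toFinset from by ext a; simp]
  have h1 : ∑ k ∈ gt.toFinset, min (List.count k gt) (List.count k sc)
      = ∑ k ∈ gt.toFinset, ((sc : Multiset String) ∩ (gt : Multiset String)).count k := by
    refine Finset.sum_congr rfl fun a _ => ?_
    simp [Nat.min_comm]
  have hsub : ((sc : Multiset String) ∩ (gt : Multiset String)).toFinset ⊆ gt.toFinset := by
    intro a ha
    simp only [Multiset.mem_toFinset, Multiset.mem_inter] at ha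
    simpa using ha.2
  have h2 := Finset.sum_subset hsub (f := fun k => ((sc : Multiset String) ∩ (gt : Multiset String)).count k)
    (fun x _ hx => Multiset.count_eq_zero.mpr (by simpa using hx))
  rw [h1, ← h2, Multiset.toFinset_sum_count_eq]
  rfl

theorem ctg_sum_min_eq (gt sc : List String) :
    ((PySem.Set.ofList gt).map (fun k => min (gt.count k : Int) (sc.count k : Int))).sum
      = (ctgI sc gt : Int) := by
  rw [show (fun k => min (gt.count k : Int) (sc.count k : Int))
        = fun k => ((min (gt.count k) (sc.count k) : Nat) : Int) from
      funext fun k => by simp [Nat.cast_min]]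
  rw [show ((PySem.Set.ofList gt).map fun k => ((min (gt.count k) (sc.count k) : Nat) : Int))
        = ((PySem.Set.ofList gt).map fun k => min (gt.count k) (sc.count k)).map
            (fun n : Nat => (n : Int)) from List.map_map.symm]
  rw [← Nat.cast_list_sum, ctg_sum_min_eq_nat]

-- B computes the closed form on every input
theorem ctg_alt_eq (gt sc : List String) :
    compare_to_ground_truth_alt gt sc =
      [(ctgI sc gt : Int), (sc.length : Int) - (ctgI sc gt : Int),
        (gt.length : Int) - (ctgI sc gt : Int)] := by
  unfold compare_to_ground_truth_alt
  simp only [PySem.Dict.foldl_insert_getD_add_one_eq_counter, PySem.Dict.items_counter,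
    List.map_map]
  rw [show ((fun p : String × Int => min p.2 ((PySem.Dict.counter sc).getD p.1 0)) ∘
        fun k => (k, (gt.count k : Int)))
      = fun k => min (gt.count k : Int) (sc.count k : Int) from
    funext fun k => by simp [PySem.Dict.getD_counter]]
  rw [ctg_sum_min_eq]

-- A computes the same closed form (early returns and the loop both reduce to it)
theorem ctg_a_eq (gt sc : List String) :
    compare_to_ground_truth gt sc =
      [(ctgI sc gt : Int), (sc.length : Int) - (ctgI sc gt : Int),
        (gt.length : Int) - (ctgI sc gt : Int)] := by
  unfold compare_to_ground_truth
  by_cases hsc : sc = []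
  · by_cases hgt : gt = []
    · subst hsc; subst hgt; simp [ctgI]
    · subst hsc
      simp [ctgI, List.length_eq_zero_iff, hgt]
  · by_cases hgt : gt = []
    · subst hgt
      simp [ctgI, List.length_eq_zero_iff, hsc]
    · have hsc' : ¬ ((sc.length : Int) = 0) := by
        simp [List.length_eq_zero_iff, hsc]
      have hgt' : ¬ ((gt.length : Int) = 0) := by
        simp [List.length_eq_zero_iff, hgt]
      simp only [hsc', hgt', false_and, and_false, if_false]
      obtain ⟨h1, h2, h3⟩ := ctgLoopA_spec sc gt 0 0
      rcases he : ctgLoopA sc 0 0 gt with ⟨tp, fp, rest⟩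
      rw [he] at h1 h2 h3
      simp at h1 h2 h3
      simp [h1, h2, h3]

-- ===== VERDICT (by name: the statement is the Claim_ definition above) =====
theorem compare_to_ground_truth_spec : Claim_equal_compare_to_ground_truth := by
  intro gt sc _
  unfold Spec_compare_to_ground_truth
  rw [ctg_a_eq, ctg_alt_eq]
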